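-- pv_equiv track=rewrite | github.com/Kamalabot/HowCompetitive | solution_code/dmopc20c2p2.py | colors_dict
-- ===== SOURCE A (Python) =====
-- from typing import List
--
-- def find_index(color_list: List[int], color: int, location: int):
--
--     if location == 1:
--
--         ind = 0
--
--         idx = 0
--
--         while True:
--
--             if color_list[ind] == color and ind > idx:
--
--                 idx = ind
--
--             ind = ind + 1
--
--             if ind > len(color_list) - 1:
--
--                 break
--
--         return idx
--
--     else:
--
--         return color_list.index(color)
--
-- def colors_dict(raw_scarf):
--
--     temp = set(raw_scarf) # removing the duplicates to only find the colors.
--     temp = list(temp)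
--
--     color_dict = {}
--
--     for color in temp: #get left most and right most of each color
--
--         left_most = find_index(raw_scarf, color, 1)
--
--         right_most = find_index(raw_scarf, color, 0)
--
--         color_dict[color] = [left_most, right_most]
--
--     return color_dict
-- ===== SOURCE B (Python) =====
-- def colors_dict(raw_scarf):
--     # One pass: d[color] = [last_index_so_far, first_index] (A stores [last, first] too).
--     d = {}
--     for i, c in enumerate(raw_scarf):
--         if c in d:
--             d[c][0] = i
--         else:
--             d[c] = [i, i]
--     return d
-- ===== Notes on version B (the rewrite author's own statement) =====
-- stated objective: faster
-- what changed: Replaces the per-color scans (a while-loop over the whole list plus list.index for every distinct color) by a single enumerate pass that records each color's first index on insertion and overwrites the last index in place.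
import Mathlib
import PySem

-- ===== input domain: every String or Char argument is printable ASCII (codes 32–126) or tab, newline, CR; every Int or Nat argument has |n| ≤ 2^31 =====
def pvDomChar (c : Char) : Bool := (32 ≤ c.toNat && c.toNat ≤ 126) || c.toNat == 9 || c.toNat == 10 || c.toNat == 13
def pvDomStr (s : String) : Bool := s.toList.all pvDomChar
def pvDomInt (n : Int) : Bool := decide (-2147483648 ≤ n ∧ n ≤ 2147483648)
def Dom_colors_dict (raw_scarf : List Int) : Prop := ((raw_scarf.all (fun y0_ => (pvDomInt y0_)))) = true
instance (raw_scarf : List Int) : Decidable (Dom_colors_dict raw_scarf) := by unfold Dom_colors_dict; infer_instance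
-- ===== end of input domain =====

-- B replaces A's per-color scans by one enumerate pass keeping [last, first] per color in a dict;
-- equal return value (as a dict); neither version mutates its argument.

-- ===== PORT A =====
-- the 'while True' body of find_index(.., 1): runs exactly len(color_list) times (ind = 0,1,…),
-- fuel = remaining iterations; pyGet? never returns none on the iterations actually reached.
def find_index_loop (cl : List Int) (color : Int) (idx ind : Int) : Nat → Int
  | 0 => idx
  | fuel + 1 =>
    let idx := if PySem.List.pyGet? cl ind = some color ∧ ind > idx then ind else idx
    find_index_loop cl color idx (ind + 1) fuel

-- location == 1: the manual last-occurrence scan; else color_list.index(color)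
-- (.getD 0 is unreachable: colors_dict only asks for colors that are members).
def find_index (color_list : List Int) (color : Int) (location : Int) : Int :=
  if location = 1 then find_index_loop color_list color 0 0 color_list.length
  else ((PySem.List.index? color_list color).getD 0 : Nat)

def colors_dict (raw_scarf : List Int) : List (Int × List Int) :=
  let temp := PySem.Set.ofList raw_scarf
  let color_dict : PySem.Dict Int (List Int) :=
    temp.foldl (fun d color =>
      d.insert color [find_index raw_scarf color 1, find_index raw_scarf color 0])
      PySem.Dict.empty
  color_dict.items

-- ===== PORT B =====
def colors_dict_alt (raw_scarf : List Int) : List (Int × List Int) :=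
  let d : PySem.Dict Int (List Int) :=
    (PySem.List.enumerate raw_scarf).foldl (fun d p =>
      match d.get? p.2 with
      | some v => d.insert p.2 (p.1 :: v.drop 1)   -- 'd[c][0] = i' : replace slot 0 in place
      | none   => d.insert p.2 [p.1, p.1])         -- 'd[c] = [i, i]'
      PySem.Dict.empty
  d.items

-- ===== PRECONDITION & SPEC =====
def Spec_colors_dict (raw_scarf : List Int) (out : List (Int × List Int)) : Prop := out = colors_dict_alt raw_scarf
instance (raw_scarf : List Int) (out : List (Int × List Int)) : Decidable (Spec_colors_dict raw_scarf out) := by unfold Spec_colors_dict; infer_instance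

-- ===== CLAIM (what is proved, stated in full; the proofs are below) =====
def Claim_equal_colors_dict : Prop := ∀ (raw_scarf : List Int), Dom_colors_dict raw_scarf → Spec_colors_dict raw_scarf (colors_dict raw_scarf)

-- ===== LEMMAS AND PROOFS =====

-- first-occurrence index (what find_index .. 0 computes for a member)
def Fi (raw : List Int) (c : Int) : Int := ((PySem.List.index? raw c).getD 0 : Nat)
-- last-occurrence index, phrased through the reversed list
def Li (raw : List Int) (c : Int) : Int :=
  (raw.length : Int) - 1 - ((raw.reverse.idxOf c : Nat) : Int)

theorem Li_snoc_self (raw : List Int) (x : Int) : Li (raw ++ [x]) x = raw.length := by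
  simp [Li]

theorem Li_snoc_ne (raw : List Int) (x c : Int) (h : c ≠ x) :
    Li (raw ++ [x]) c = Li raw c := by
  simp [Li, Ne.symm h]
  ring

theorem Fi_snoc_mem (raw : List Int) (x c : Int) (h : c ∈ raw) :
    Fi (raw ++ [x]) c = Fi raw c := by
  unfold Fi
  rw [PySem.List.index?_append_of_mem _ h]

theorem Fi_snoc_self (raw : List Int) (x : Int) (h : x ∉ raw) :
    Fi (raw ++ [x]) x = raw.length := by
  unfold Fi
  rw [PySem.List.index?_append_singleton_self raw x h]
  rfl

def gstep (cl : List Int) (c : Int) (idx i : Int) : Int :=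
  if PySem.List.pyGet? cl i = some c ∧ i > idx then i else idx

def idxList (ind : Int) (fuel : Nat) : List Int := (List.range fuel).map (fun k : Nat => ind + (k : Int))

theorem idxList_succ_left (ind : Int) (fuel : Nat) :
    idxList ind (fuel + 1) = ind :: idxList (ind + 1) fuel := by
  unfold idxList
  rw [List.range_succ_eq_map, List.map_cons, List.map_map]
  congr 1
  · simp
  · apply List.map_congr_left
    intro k _
    simp [Function.comp]
    push_cast
    ring

theorem idxList_succ_right (ind : Int) (fuel : Nat) :
    idxList ind (fuel + 1) = idxList ind fuel ++ [ind + fuel] := by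
  simp [idxList, List.range_succ]

theorem loop_eq_foldl (cl : List Int) (c : Int) :
    ∀ (fuel : Nat) (ind idx : Int),
      find_index_loop cl c idx ind fuel = (idxList ind fuel).foldl (gstep cl c) idx := by
  intro fuel
  induction fuel with
  | zero => intro ind idx; simp [find_index_loop, idxList]
  | succ n ih =>
    intro ind idx
    rw [idxList_succ_left]
    simp only [find_index_loop, List.foldl_cons]
    rw [ih]
    rfl

theorem foldl_gstep_of_not_mem (cl : List Int) (c : Int) (hc : c ∉ cl) :
    ∀ (fuel : Nat) (ind idx : Int),
      (idxList ind fuel).foldl (gstep cl c) idx = idx := by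
  intro fuel
  induction fuel with
  | zero => intro ind idx; simp [idxList]
  | succ n ih =>
    intro ind idx
    rw [idxList_succ_left, List.foldl_cons]
    have hne : PySem.List.pyGet? cl ind ≠ some c := fun h =>
      hc (PySem.List.mem_of_pyGet?_eq_some cl h)
    rw [show gstep cl c idx ind = idx by simp [gstep, hne]]
    exact ih (ind + 1) idx

theorem pyGet?_append_lt (cl : List Int) (x : Int) (k : Nat) (hk : k < cl.length) :
    PySem.List.pyGet? (cl ++ [x]) (k : Int) = PySem.List.pyGet? cl (k : Int) := by
  rw [PySem.List.pyGet?_natCast, PySem.List.pyGet?_natCast]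
  rw [List.getElem?_append_left hk]

theorem foldl_gstep_append (cl : List Int) (x c : Int) :
    ∀ (fuel : Nat) (ind : Nat) (hi : ind + fuel ≤ cl.length) (idx : Int),
      (idxList ind fuel).foldl (gstep (cl ++ [x]) c) idx =
      (idxList ind fuel).foldl (gstep cl c) idx := by
  intro fuel
  induction fuel with
  | zero => intro ind _ idx; simp [idxList]
  | succ n ih =>
    intro ind hi idx
    rw [idxList_succ_left, List.foldl_cons, List.foldl_cons]
    have hg : gstep (cl ++ [x]) c idx (ind : Int) = gstep cl c idx (ind : Int) := by
      unfold gstep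
      rw [pyGet?_append_lt cl x ind (by omega)]
    rw [hg]
    have h2 := ih (ind + 1) (by omega) (gstep cl c idx (ind : Int))
    push_cast at h2
    exact h2

theorem fold_eq_Li (cl : List Int) :
    ∀ c, c ∈ cl → (idxList 0 cl.length).foldl (gstep cl c) 0 = Li cl c := by
  induction cl using List.reverseRecOn with
  | nil => intro c hc; simp at hc
  | append_singleton cl x ih =>
    intro c hc
    have hlen : (cl ++ [x]).length = cl.length + 1 := by simp
    rw [hlen, idxList_succ_right, List.foldl_append, List.foldl_cons, List.foldl_nil]
    have hcongr := foldl_gstep_append cl x c cl.length 0 (by omega) 0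
    simp only [Nat.cast_zero] at hcongr
    rw [hcongr]
    have hget : PySem.List.pyGet? (cl ++ [x]) ((0 : Int) + (cl.length : Int)) = some x := by
      rw [zero_add, PySem.List.pyGet?_natCast]
      simp
    by_cases hcx : c = x
    · subst hcx
      by_cases hmem : c ∈ cl
      · rw [ih c hmem]
        have hLi : Li cl c < (cl.length : Int) := by
          unfold Li; omega
        rw [Li_snoc_self]
        unfold gstep
        rw [hget]
        split_ifs with hcond
        · omega
        · exfalso
          exact hcond ⟨rfl, by omega⟩
      · rw [foldl_gstep_of_not_mem cl c hmem]
        rw [Li_snoc_self]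
        unfold gstep
        rw [hget]
        split_ifs with hcond
        · omega
        · push_neg at hcond
          have := hcond rfl
          omega
    · have hmem : c ∈ cl := by
        rcases List.mem_append.mp hc with h | h
        · exact h
        · simp at h; exact absurd h hcx
      rw [show gstep (cl ++ [x]) c ((idxList 0 cl.length).foldl (gstep cl c) 0)
            ((0:Int) + cl.length) = (idxList 0 cl.length).foldl (gstep cl c) 0 by
        unfold gstep
        rw [hget]
        simp [Ne.symm hcx]]
      rw [ih c hmem, Li_snoc_ne cl x c hcx]

theorem find_index_one_eq_Li (raw : List Int) (c : Int) (hc : c ∈ raw) :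
    find_index raw c 1 = Li raw c := by
  unfold find_index
  rw [if_pos rfl, loop_eq_foldl, fold_eq_Li raw c hc]

theorem find_index_zero_eq_Fi (raw : List Int) (c : Int) :
    find_index raw c 0 = Fi raw c := by
  simp [find_index, Fi]

-- the dict A builds: a fold of inserts over distinct fresh keys appends
theorem colors_dict_eq_map (raw : List Int) :
    colors_dict raw =
      (PySem.Set.ofList raw).map
        (fun c => (c, [find_index raw c 1, find_index raw c 0])) := by
  show ((PySem.Set.ofList raw).foldl (fun d color =>
      d.insert color [find_index raw color 1, find_index raw color 0])
      PySem.Dict.empty).items = _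
  rw [PySem.Dict.items_foldl_insert_fresh (PySem.Set.ofList raw) (fun c => c) _ _
        (fun a _ => PySem.Dict.contains_empty a)
        (by simpa using PySem.Set.nodup_ofList raw)]
  rfl

theorem get?_map_of_mem (l : List Int) (f : Int → List Int) (x : Int)
    (hx : x ∈ l) (hnd : l.Nodup) :
    (PySem.Dict.mk (l.map fun c => (c, f c))).get? x = some (f x) := by
  apply PySem.Dict.get?_of_mem_items
  · exact List.mem_map.mpr ⟨x, hx, rfl⟩
  · simpa [PySem.Dict.keys, List.map_map, Function.comp_def] using hnd

theorem get?_map_of_not_mem (l : List Int) (f : Int → List Int) (x : Int)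
    (hx : x ∉ l) :
    (PySem.Dict.mk (l.map fun c => (c, f c))).get? x = none := by
  rw [PySem.Dict.get?_eq_none_iff_not_mem_keys]
  simpa [PySem.Dict.keys, List.map_map, Function.comp_def] using hx

-- the dict B builds, characterised: keys in first-occurrence order, value [last, first]
theorem colors_dict_alt_fold_eq (raw : List Int) :
    (PySem.List.enumerate raw).foldl (fun d p =>
        match d.get? p.2 with
        | some v => d.insert p.2 (p.1 :: v.drop 1)
        | none   => d.insert p.2 [p.1, p.1]) (PySem.Dict.empty : PySem.Dict Int (List Int)) =
      PySem.Dict.mk ((PySem.Set.ofList raw).map (fun c => (c, [Li raw c, Fi raw c]))) := by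
  induction raw using List.reverseRecOn with
  | nil => rfl
  | append_singleton raw x ih =>
    rw [PySem.List.enumerate_append, List.foldl_append, ih]
    simp only [PySem.List.enumerate_cons, PySem.List.enumerate_nil, List.foldl_cons,
      List.foldl_nil, zero_add]
    by_cases hmem : x ∈ raw
    · rw [get?_map_of_mem _ _ _ ((PySem.Set.mem_ofList _ _).mpr hmem) (PySem.Set.nodup_ofList raw)]
      have hcont : (PySem.Dict.mk ((PySem.Set.ofList raw).map
          (fun c => (c, [Li raw c, Fi raw c])))).contains x = true := by
        rw [PySem.Dict.contains_eq_isSome_get?,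
          get?_map_of_mem _ _ _ ((PySem.Set.mem_ofList _ _).mpr hmem) (PySem.Set.nodup_ofList raw)]
        rfl
      apply PySem.Dict.ext
      rw [PySem.Dict.items_insert_of_contains _ _ hcont]
      have hset : PySem.Set.ofList (raw ++ [x]) = PySem.Set.ofList raw := by
        rw [PySem.Set.ofList_append_singleton, PySem.Set.add]
        simp [PySem.Set.contains, hmem]
      rw [hset]
      simp only [List.map_map]
      apply List.map_congr_left
      intro c hcmem
      have hcraw : c ∈ raw := (PySem.Set.mem_ofList _ _).mp hcmem
      by_cases hcx : c = x
      · rw [hcx]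
        simp only [Function.comp_def, beq_self_eq_true, if_true]
        rw [Li_snoc_self, Fi_snoc_mem raw x x (hcx ▸ hcraw)]
        rfl
      · simp only [Function.comp_def, beq_iff_eq, if_neg hcx]
        rw [Li_snoc_ne raw x c hcx, Fi_snoc_mem raw x c hcraw]
    · rw [get?_map_of_not_mem _ _ _ (fun h => hmem ((PySem.Set.mem_ofList _ _).mp h))]
      have hcont : (PySem.Dict.mk ((PySem.Set.ofList raw).map
          (fun c => (c, [Li raw c, Fi raw c])))).contains x = false := by
        rw [PySem.Dict.contains_eq_isSome_get?,
          get?_map_of_not_mem _ _ _ (fun h => hmem ((PySem.Set.mem_ofList _ _).mp h))]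
        rfl
      apply PySem.Dict.ext
      rw [PySem.Dict.items_insert_of_not_contains _ _ hcont]
      have hset : PySem.Set.ofList (raw ++ [x]) = PySem.Set.ofList raw ++ [x] := by
        rw [PySem.Set.ofList_append_singleton, PySem.Set.add]
        simp [PySem.Set.contains, hmem]
      rw [hset]
      simp only [List.map_append, List.map_cons, List.map_nil]
      congr 1
      · apply List.map_congr_left
        intro c hcmem
        have hcraw : c ∈ raw := (PySem.Set.mem_ofList _ _).mp hcmem
        have hcx : c ≠ x := fun h => hmem (h ▸ hcraw)
        rw [Li_snoc_ne raw x c hcx, Fi_snoc_mem raw x c hcraw]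
      · rw [Li_snoc_self, Fi_snoc_self raw x hmem]

theorem colors_dict_alt_eq_map (raw : List Int) :
    colors_dict_alt raw =
      (PySem.Set.ofList raw).map (fun c => (c, [Li raw c, Fi raw c])) := by
  show ((PySem.List.enumerate raw).foldl (fun d p =>
      match d.get? p.2 with
      | some v => d.insert p.2 (p.1 :: v.drop 1)
      | none   => d.insert p.2 [p.1, p.1]) (PySem.Dict.empty : PySem.Dict Int (List Int))).items = _
  rw [colors_dict_alt_fold_eq]

-- ===== VERDICT (by name: the statement is the Claim_ definition above) =====
theorem colors_dict_spec : Claim_equal_colors_dict := by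
  intro raw _
  unfold Spec_colors_dict
  rw [colors_dict_eq_map, colors_dict_alt_eq_map]
  apply List.map_congr_left
  intro c hc
  have hcraw : c ∈ raw := (PySem.Set.mem_ofList _ _).mp hc
  rw [find_index_one_eq_Li raw c hcraw, find_index_zero_eq_Fi]
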